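-- pv_equiv track=rewrite | github.com/khushiiagrawal/Adaptive-Threat-Modeler | mcp/api.py | extract_security_findings_from_report
-- ===== SOURCE A (Python) =====
-- from typing import TypedDict, List, Dict, Optional
--
-- def extract_security_findings_from_report(report_content: str) -> List[Dict]:
--     """Extract structured security findings from the report content"""
--     findings = []
--
--     # Parse the report to extract structured findings
--     lines = report_content.split('\n')
--     current_finding = None
--
--     for line in lines:
--         # Look for severity indicators
--         if any(severity in line.lower() for severity in ["critical", "high", "medium", "low", "warning"]):
--             if current_finding:
--                 findings.append(current_finding)
--
--             # Extract severity
--             severity = "medium"  # default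
--             for sev in ["critical", "high", "medium", "low", "warning"]:
--                 if sev in line.lower():
--                     severity = sev
--                     break
--
--             current_finding = {
--                 "severity": severity,
--                 "title": line.strip(),
--                 "description": "",
--                 "recommendation": ""
--             }
--         elif current_finding and line.strip().startswith("-"):
--             # This is likely a detail line
--             if "recommendation" in line.lower() or "fix" in line.lower():
--                 current_finding["recommendation"] = line.strip()
--             else:
--                 current_finding["description"] += line.strip() + " "
--
--     if current_finding:
--         findings.append(current_finding)
--
--     return findings
-- ===== SOURCE B (Python) =====
-- # Segment-based re-implementation: find severity "header" lines, then build each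
-- # finding from its header and the block of lines up to the next header.
--
-- _SEVS = ["critical", "high", "medium", "low", "warning"]
--
--
-- def _has_sev(line):
--     low = line.lower()
--     return any(s in low for s in _SEVS)
--
--
-- def _build(header, seg):
--     desc = ""
--     rec = ""
--     for l in seg:
--         t = l.strip()
--         if t.startswith("-"):
--             if "recommendation" in l.lower() or "fix" in l.lower():
--                 rec = t
--             else:
--                 desc = desc + t + " "
--     sev = next((s for s in _SEVS if s in header.lower()), "medium")
--     return {"severity": sev, "title": header.strip(),
--             "description": desc, "recommendation": rec}
--
--
-- def extract_security_findings_from_report(report_content):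
--     lines = report_content.split('\n')
--     n = len(lines)
--     findings = []
--     k = 0
--     while k < n:
--         if not _has_sev(lines[k]):
--             k += 1
--             continue
--         j = k + 1
--         while j < n and not _has_sev(lines[j]):
--             j += 1
--         findings.append(_build(lines[k], lines[k + 1:j]))
--         k = j
--     return findings
-- ===== Notes on version B (the rewrite author's own statement) =====
-- stated objective: alternative
-- what changed: A threads a mutable current-finding dict through a single stateful scan of the lines; B first segments the report at severity-header lines and then builds each finding functionally from its header and its own block of detail lines.
import Mathlib
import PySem

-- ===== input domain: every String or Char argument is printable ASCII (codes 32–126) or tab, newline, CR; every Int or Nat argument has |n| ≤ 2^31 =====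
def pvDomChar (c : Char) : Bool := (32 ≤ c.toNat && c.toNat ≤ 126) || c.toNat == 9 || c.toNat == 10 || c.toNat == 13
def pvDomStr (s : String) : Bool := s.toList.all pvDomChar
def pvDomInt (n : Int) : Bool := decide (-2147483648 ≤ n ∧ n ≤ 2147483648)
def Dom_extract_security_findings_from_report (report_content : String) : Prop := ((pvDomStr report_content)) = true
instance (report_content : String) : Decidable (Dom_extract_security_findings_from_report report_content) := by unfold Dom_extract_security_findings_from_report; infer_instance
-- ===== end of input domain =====

-- B replaces A's single stateful scan (a mutable current-finding dict threaded
-- through every line) by a segmentation: locate each severity header, take the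
-- block of lines up to the next header, and build that finding in one piece.

-- report_content.split('\n') (nonempty separator; PySem.Chars.splitOn is the exact sep ≠ "" form)
def pvLines (rc : String) : List String :=
  (PySem.Chars.splitOn rc.toList "\n".toList).map String.ofList

-- severity keywords, shared verbatim by both programs
def pvSevs : List String := ["critical", "high", "medium", "low", "warning"]

-- 'any(severity in line.lower() for severity in [...])', shared by both programs
def pvHasSev (line : String) : Bool :=
  pvSevs.any (fun s => PySem.Str.isIn s (PySem.Str.lower line))

-- ===== PORT A =====
-- A's 'for sev in [...]: if sev in line.lower(): severity = sev; break' with default "medium"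
def aSevLoop (sevs : List String) (line : String) : String :=
  match sevs with
  | [] => "medium"
  | s :: r => if PySem.Str.isIn s (PySem.Str.lower line) then s else aSevLoop r line

-- the dict literal A assigns to current_finding
def aMkFinding (line : String) : PySem.Dict String String :=
  PySem.Dict.ofList
    [("severity", aSevLoop pvSevs line), ("title", PySem.Str.strip line),
     ("description", ""), ("recommendation", "")]

-- A's loop body; findings are stored as item lists (the returned representation)
def aStep (st : List (List (String × String)) × Option (PySem.Dict String String))
    (line : String) : List (List (String × String)) × Option (PySem.Dict String String) :=
  if pvHasSev line then
    (match st.2 with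
     | some c => st.1 ++ [c.items]
     | none => st.1,
     some (aMkFinding line))
  else
    match st.2 with
    | some c =>
      if PySem.Str.startswith (PySem.Str.strip line) "-" then
        if PySem.Str.isIn "recommendation" (PySem.Str.lower line)
            || PySem.Str.isIn "fix" (PySem.Str.lower line) then
          (st.1, some (c.insert "recommendation" (PySem.Str.strip line)))
        else
          (st.1, some (c.insert "description"
            (c.getD "description" "" ++ PySem.Str.strip line ++ " ")))
      else (st.1, st.2)
    | none => (st.1, st.2)

def extract_security_findings_from_report (report_content : String) : List (List (String × String)) :=
  let lines := pvLines report_content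
  let st := lines.foldl aStep ([], none)
  match st.2 with
  | some c => st.1 ++ [c.items]
  | none => st.1

-- ===== PORT B =====
-- B's severity lookup: next((s for s in SEVS if s in header.lower()), "medium")
def bSev (header : String) : String :=
  (pvSevs.find? (fun s => PySem.Str.isIn s (PySem.Str.lower header))).getD "medium"

-- B's per-detail-line accumulator over (desc, rec)
def bDetail (dr : String × String) (l : String) : String × String :=
  let t := PySem.Str.strip l
  if PySem.Str.startswith t "-" then
    if PySem.Str.isIn "recommendation" (PySem.Str.lower l)
        || PySem.Str.isIn "fix" (PySem.Str.lower l) then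
      (dr.1, t)
    else (dr.1 ++ t ++ " ", dr.2)
  else dr

-- _build(header, seg)
def bBuild (header : String) (seg : List String) : List (String × String) :=
  let dr := seg.foldl bDetail ("", "")
  [("severity", bSev header), ("title", PySem.Str.strip header),
   ("description", dr.1), ("recommendation", dr.2)]

-- B's inner while loop: split off the run of non-header lines
def bSpan (ls : List String) : List String × List String :=
  (ls.takeWhile (fun l => !pvHasSev l), ls.dropWhile (fun l => !pvHasSev l))

theorem bSpan_snd_length_le (ls : List String) : (bSpan ls).2.length ≤ ls.length :=
  (List.dropWhile_sublist _).length_le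

-- B's outer while loop (recursion over the line list)
def bFindings (lines : List String) : List (List (String × String)) :=
  match lines with
  | [] => []
  | l :: rest =>
    if pvHasSev l then
      bBuild l (bSpan rest).1 :: bFindings (bSpan rest).2
    else bFindings rest
termination_by lines.length
decreasing_by
  · exact Nat.lt_succ_of_le (bSpan_snd_length_le rest)
  · exact Nat.lt_succ_self _

def extract_security_findings_from_report_alt (report_content : String) : List (List (String × String)) :=
  bFindings (pvLines report_content)

-- ===== PRECONDITION & SPEC =====
def Spec_extract_security_findings_from_report (report_content : String) (out : List (List (String × String))) : Prop := out = extract_security_findings_from_report_alt report_content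
instance (report_content : String) (out : List (List (String × String))) : Decidable (Spec_extract_security_findings_from_report report_content out) := by unfold Spec_extract_security_findings_from_report; infer_instance

-- ===== CLAIM (what is proved, stated in full; the proofs are below) =====
def Claim_equal_extract_security_findings_from_report : Prop := ∀ (report_content : String), Dom_extract_security_findings_from_report report_content → Spec_extract_security_findings_from_report report_content (extract_security_findings_from_report report_content)

-- ===== LEMMAS AND PROOFS =====

-- A's current_finding dict, built from header h with accumulated desc d and rec r
def curDict (h d r : String) : PySem.Dict String String :=
  PySem.Dict.mk
    [("severity", aSevLoop pvSevs h), ("title", PySem.Str.strip h),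
     ("description", d), ("recommendation", r)]

theorem aMkFinding_eq (h : String) : aMkFinding h = curDict h "" "" := rfl

theorem curDict_insert_rec (h d r t : String) :
    (curDict h d r).insert "recommendation" t = curDict h d t := rfl

theorem curDict_insert_desc (h d r t : String) :
    (curDict h d r).insert "description" t = curDict h t r := rfl

theorem curDict_getD_desc (h d r : String) :
    (curDict h d r).getD "description" "" = d := rfl

-- B's build with a pre-accumulated (desc, rec) pair
def bBuildAcc (h d r : String) (seg : List String) : List (String × String) :=
  let dr := seg.foldl bDetail (d, r)
  [("severity", bSev h), ("title", PySem.Str.strip h),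
   ("description", dr.1), ("recommendation", dr.2)]

theorem bBuildAcc_nil (h d r : String) :
    bBuildAcc h d r [] =
      [("severity", bSev h), ("title", PySem.Str.strip h),
       ("description", d), ("recommendation", r)] := rfl

theorem bBuild_eq (h : String) (seg : List String) : bBuild h seg = bBuildAcc h "" "" seg := rfl

theorem sev_find_eq_loop (sevs : List String) (line : String) :
    (sevs.find? (fun s => PySem.Str.isIn s (PySem.Str.lower line))).getD "medium"
      = aSevLoop sevs line := by
  induction sevs with
  | nil => rfl
  | cons s r ih =>
    simp only [List.find?_cons, aSevLoop]
    cases hs : PySem.Str.isIn s (PySem.Str.lower line) with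
    | true => rfl
    | false => simpa using ih

theorem curDict_items (h d r : String) :
    (curDict h d r).items = bBuildAcc h d r [] := by
  simp only [bBuildAcc_nil, curDict, bSev, sev_find_eq_loop]

-- finalize: what A returns from its final state
def aFin (st : List (List (String × String)) × Option (PySem.Dict String String)) :
    List (List (String × String)) :=
  match st.2 with
  | some c => st.1 ++ [c.items]
  | none => st.1

-- main invariant, segment in progress: A's fold from (fs, some (curDict h d r))
theorem aFold_some (lines : List String) : ∀ (fs : List (List (String × String))) (h d r : String),
    aFin (lines.foldl aStep (fs, some (curDict h d r)))
      = fs ++ (bBuildAcc h d r (lines.takeWhile (fun l => !pvHasSev l))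
               :: bFindings (lines.dropWhile (fun l => !pvHasSev l))) := by
  induction lines with
  | nil =>
    intro fs h d r
    simp [aFin, curDict_items, bFindings]
  | cons l rest ih =>
    intro fs h d r
    by_cases hl : pvHasSev l = true
    · have hstep : aStep (fs, some (curDict h d r)) l
          = (fs ++ [(curDict h d r).items], some (aMkFinding l)) := by
        simp [aStep, hl]
      rw [List.foldl_cons, hstep, aMkFinding_eq, ih]
      simp [hl, List.takeWhile_cons, List.dropWhile_cons, bFindings, curDict_items,
        bBuild_eq, bSpan]
    · have hstep : aStep (fs, some (curDict h d r)) l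
          = (fs, some (curDict h (bDetail (d, r) l).1 (bDetail (d, r) l).2)) := by
        simp only [aStep, hl, Bool.false_eq_true, if_false, bDetail,
          curDict_getD_desc, curDict_insert_rec, curDict_insert_desc]
        split_ifs <;> rfl
      rw [List.foldl_cons, hstep, ih]
      have hacc : ∀ seg, bBuildAcc h (bDetail (d, r) l).1 (bDetail (d, r) l).2 seg
          = bBuildAcc h d r (l :: seg) := by
        intro seg; simp [bBuildAcc]
      simp [hl, List.takeWhile_cons, List.dropWhile_cons, hacc]

-- main invariant, no segment open: A's fold from (fs, none)
theorem aFold_none (lines : List String) : ∀ (fs : List (List (String × String))),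
    aFin (lines.foldl aStep (fs, none)) = fs ++ bFindings lines := by
  induction lines with
  | nil => intro fs; simp [aFin, bFindings]
  | cons l rest ih =>
    intro fs
    by_cases hl : pvHasSev l = true
    · have hstep : aStep (fs, none) l = (fs, some (aMkFinding l)) := by
        simp [aStep, hl]
      rw [List.foldl_cons, hstep, aMkFinding_eq, aFold_some]
      simp [bFindings, hl, bBuild_eq, bSpan]
    · have hstep : aStep (fs, none) l = (fs, none) := by
        simp [aStep, hl]
      rw [List.foldl_cons, hstep, ih]
      simp [bFindings, hl]


-- ===== VERDICT (by name: the statement is the Claim_ definition above) =====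
theorem extract_security_findings_from_report_spec : Claim_equal_extract_security_findings_from_report := by
  intro report_content _
  unfold Spec_extract_security_findings_from_report
  unfold extract_security_findings_from_report extract_security_findings_from_report_alt
  have := aFold_none (pvLines report_content) []
  simpa [aFin] using this
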